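-- pv_equiv track=rewrite | github.com/AdityaBhatt37/RazorPay-Clone | Python/EndPractical/q11uniqetuplemap.py | uni
-- ===== SOURCE A (Python) =====
-- def uni(t):
--     lis = []
--
--     for items in t:
--
--         if items in lis:
--             lis.remove(items)
--         else:
--             lis.append(items)
--
--     return tuple(lis)
-- ===== SOURCE B (Python) =====
-- def uni(t):
--     d = {}
--     for x in t:
--         d[x] = d.pop(x, 0) + 1
--     return tuple(k for k, v in d.items() if v % 2)
-- ===== Notes on version B (the rewrite author's own statement) =====
-- stated objective: faster
-- what changed: Replaces the quadratic membership-toggle list (in/remove/append per element) with one dict pass keeping each value's parity count, pop+reinsert moving it to its last-occurrence position, then emitting the odd-count keys.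
import Mathlib
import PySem

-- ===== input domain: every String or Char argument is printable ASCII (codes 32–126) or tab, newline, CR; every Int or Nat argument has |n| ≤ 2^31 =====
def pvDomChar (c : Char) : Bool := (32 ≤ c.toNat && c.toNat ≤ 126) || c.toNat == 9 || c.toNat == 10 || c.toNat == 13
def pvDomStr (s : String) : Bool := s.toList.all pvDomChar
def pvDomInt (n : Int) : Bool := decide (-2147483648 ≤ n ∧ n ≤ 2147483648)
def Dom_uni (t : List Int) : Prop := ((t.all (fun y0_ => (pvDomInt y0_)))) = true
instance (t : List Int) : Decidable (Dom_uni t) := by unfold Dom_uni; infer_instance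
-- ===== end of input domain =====

-- B replaces A's quadratic membership-toggle list with a single dict pass (parity count,
-- pop+reinsert to track last occurrence), emitting the odd-count keys; asymptotically faster.

-- ===== PORT A =====
-- one loop step of A: toggle membership of `items` in `lis`
def uniStep (lis : List Int) (items : Int) : List Int :=
  if lis.contains items then
    match PySem.List.remove? lis items with
    | some l => l
    | none => lis      -- unreachable: membership was just checked
  else lis ++ [items]

def uni (t : List Int) : List Int :=
  t.foldl uniStep []

-- ===== PORT B =====
-- one loop step of B: d[x] = d.pop(x, 0) + 1  (pop then reinsert, so x moves to the end)
def uniAltStep (d : PySem.Dict Int Int) (x : Int) : PySem.Dict Int Int :=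
  (d.erase x).insert x (d.getD x 0 + 1)

def uni_alt (t : List Int) : List Int :=
  let d := t.foldl uniAltStep PySem.Dict.empty
  (d.items.filter (fun p => PySem.Int.mod p.2 2 == 1)).map Prod.fst

-- ===== PRECONDITION & SPEC =====
def Spec_uni (t : List Int) (out : List Int) : Prop := out = uni_alt t
instance (t : List Int) (out : List Int) : Decidable (Spec_uni t out) := by unfold Spec_uni; infer_instance

-- ===== CLAIM (what is proved, stated in full; the proofs are below) =====
def Claim_equal_uni : Prop := ∀ (t : List Int), Dom_uni t → Spec_uni t (uni t)

-- ===== LEMMAS AND PROOFS =====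

-- the "odd-count keys" view of an items list (v % 2 = PySem.Int.mod v 2 here: values are counted up from 0)
def oddKeys (l : List (Int × Int)) : List Int :=
  (l.filter (fun p => p.2 % 2 == 1)).map Prod.fst

-- lookup used by uniAltStep, expressed on the items list
def lk (l : List (Int × Int)) (x : Int) : Int :=
  ((l.find? (fun p => p.1 == x)).map Prod.snd).getD 0

theorem oddKeys_cons (k v : Int) (tl : List (Int × Int)) :
    oddKeys ((k, v) :: tl)
      = if (v % 2 == 1) = true then k :: oddKeys tl else oddKeys tl := by
  simp only [oddKeys, List.filter_cons]
  split <;> simp_all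

theorem oddKeys_append (l1 l2 : List (Int × Int)) :
    oddKeys (l1 ++ l2) = oddKeys l1 ++ oddKeys l2 := by
  simp [oddKeys]

theorem oddKeys_subset_keys (l : List (Int × Int)) (x : Int)
    (h : x ∈ oddKeys l) : x ∈ l.map Prod.fst := by
  rcases List.mem_map.mp h with ⟨q, hq, hq1⟩
  exact List.mem_map.mpr ⟨q, List.mem_of_mem_filter hq, hq1⟩

theorem mem_oddKeys (l : List (Int × Int)) (x : Int)
    (hnd : (l.map Prod.fst).Nodup) :
    (x ∈ oddKeys l) ↔ (lk l x % 2 == 1) = true := by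
  induction l with
  | nil => simp [oddKeys, lk]
  | cons p tl ih =>
    obtain ⟨k, v⟩ := p
    simp only [List.map_cons, List.nodup_cons] at hnd
    rw [oddKeys_cons]
    by_cases hk : k = x
    · subst hk
      have hx : k ∉ oddKeys tl := fun h => hnd.1 (oddKeys_subset_keys tl k h)
      simp only [lk, List.find?_cons, beq_self_eq_true, Option.map_some, Option.getD_some]
      by_cases hv : (v % 2 == 1) = true
      · simp [hv, hx]
      · simp [hv, hx]
    · have hbk : (k == x) = false := by simpa using hk
      have ihx := ih hnd.2
      simp only [lk, List.find?_cons, hbk] at ihx ⊢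
      by_cases hv : (v % 2 == 1) = true
      · simp only [hv, if_pos trivial, List.mem_cons]
        constructor
        · rintro (h1 | h2)
          · exact absurd h1.symm hk
          · exact ihx.mp h2
        · intro h; exact Or.inr (ihx.mpr h)
      · simpa [hv] using ihx

theorem oddKeys_filter_of_not_mem (l : List (Int × Int)) (x : Int)
    (hx : x ∉ oddKeys l) :
    oddKeys (l.filter (fun p => !(p.1 == x))) = oddKeys l := by
  induction l with
  | nil => rfl
  | cons p tl ih =>
    obtain ⟨k, v⟩ := p
    rw [oddKeys_cons] at hx
    by_cases hk : k = x
    · subst hk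
      have hv : (v % 2 == 1) = false := by
        by_contra hc
        simp only [Bool.not_eq_false] at hc
        simp [hc] at hx
      have hxtl : k ∉ oddKeys tl := by simpa [hv] using hx
      have hcond : (!(k == k)) = false := by simp
      simp only [List.filter_cons, hcond, Bool.false_eq_true, if_false]
      rw [ih hxtl, oddKeys_cons, hv]
      simp
    · have hbk : (k == x) = false := by simpa using hk
      have hxtl : x ∉ oddKeys tl := by
        intro h
        by_cases hv : (v % 2 == 1) = true <;> simp [hv, h] at hx
      simp only [List.filter_cons, hbk, Bool.not_false, if_pos trivial]
      rw [oddKeys_cons, oddKeys_cons, ih hxtl]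

theorem filter_eq_self_of_no_key (l : List (Int × Int)) (x : Int)
    (h : x ∉ l.map Prod.fst) :
    l.filter (fun p => !(p.1 == x)) = l := by
  apply List.filter_eq_self.mpr
  intro p hp
  simp only [Bool.not_eq_eq_eq_not, Bool.not_true, beq_eq_false_iff_ne, ne_eq]
  intro hpe
  exact h (List.mem_map.mpr ⟨p, hp, hpe⟩)

theorem oddKeys_filter_of_mem (l : List (Int × Int)) (x : Int)
    (hnd : (l.map Prod.fst).Nodup) (hx : x ∈ oddKeys l) :
    oddKeys (l.filter (fun p => !(p.1 == x))) = (oddKeys l).erase x := by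
  induction l with
  | nil => cases hx
  | cons p tl ih =>
    obtain ⟨k, v⟩ := p
    simp only [List.map_cons, List.nodup_cons] at hnd
    rw [oddKeys_cons] at hx
    by_cases hk : k = x
    · subst hk
      have htl : k ∉ oddKeys tl := fun h => hnd.1 (oddKeys_subset_keys tl k h)
      have hv : (v % 2 == 1) = true := by
        by_contra hc
        simp only [Bool.not_eq_true] at hc
        rw [if_neg (by simp [hc])] at hx
        exact htl hx
      have hcond : (!(k == k)) = false := by simp
      simp only [List.filter_cons, hcond, Bool.false_eq_true, if_false]
      rw [filter_eq_self_of_no_key tl k hnd.1, oddKeys_cons, hv]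
      simp
    · have hbk : (k == x) = false := by simpa using hk
      have hxtl : x ∈ oddKeys tl := by
        by_cases hv : (v % 2 == 1) = true
        · rcases (by simpa [hv] using hx : x = k ∨ x ∈ oddKeys tl) with h1 | h2
          · exact absurd h1.symm hk
          · exact h2
        · simpa [hv] using hx
      have hrec := ih hnd.2 hxtl
      simp only [List.filter_cons, hbk, Bool.not_false, if_pos trivial]
      rw [oddKeys_cons, oddKeys_cons, hrec]
      by_cases hv : (v % 2 == 1) = true
      · simp only [hv, if_pos trivial]
        rw [List.erase_cons_tail (by simpa using hk)]
      · simp [hv]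

-- items of one B step, in closed form
theorem items_uniAltStep (d : PySem.Dict Int Int) (x : Int) :
    (uniAltStep d x).items
      = d.items.filter (fun p => !(p.1 == x)) ++ [(x, lk d.items x + 1)] := by
  simp [uniAltStep, PySem.Dict.insert, PySem.Dict.erase, PySem.Dict.getD,
    PySem.Dict.get?, lk]


theorem nodup_keys_uniAltStep (d : PySem.Dict Int Int) (x : Int)
    (hnd : (d.items.map Prod.fst).Nodup) :
    ((uniAltStep d x).items.map Prod.fst).Nodup := by
  rw [items_uniAltStep]
  simp only [List.map_append, List.map_cons, List.map_nil]
  apply List.Nodup.append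
  · exact hnd.sublist (List.Sublist.map Prod.fst List.filter_sublist)
  · simp
  · intro a ha
    rcases List.mem_map.mp ha with ⟨p, hp, hpa⟩
    have hkeep := List.of_mem_filter hp
    simp only [List.mem_singleton]
    intro hax
    subst hax
    simp [hpa] at hkeep

-- one matched step preserves the simulation
theorem step_sim (d : PySem.Dict Int Int) (x : Int)
    (hnd : (d.items.map Prod.fst).Nodup) :
    uniStep (oddKeys d.items) x = oddKeys ((uniAltStep d x).items) := by
  rw [items_uniAltStep, oddKeys_append]
  have hmem := mem_oddKeys d.items x hnd
  by_cases hx : x ∈ oddKeys d.items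
  · -- x has odd count so far: A removes it, B's new even value is filtered out
    have hcon : (oddKeys d.items).contains x = true := by simpa using hx
    have hrem := PySem.List.remove?_eq_some_erase (xs := oddKeys d.items) (v := x) hx
    have hparity : ((lk d.items x + 1) % 2 == 1) = false := by
      have h1 : lk d.items x % 2 = 1 := by simpa using hmem.mp hx
      simp only [beq_eq_false_iff_ne, ne_eq]
      omega
    simp only [uniStep, hcon, if_pos trivial, hrem]
    rw [oddKeys_filter_of_mem d.items x hnd hx, oddKeys_cons, hparity]
    simp [oddKeys]
  · -- x has even (or zero) count so far: A appends it, B's new odd value survives at the end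
    have hcon : (oddKeys d.items).contains x = false := by simpa using hx
    have hparity : ((lk d.items x + 1) % 2 == 1) = true := by
      have : (lk d.items x % 2 == 1) = false := by
        by_contra hc
        exact hx (hmem.mpr (eq_true_of_ne_false hc))
      simp only [beq_iff_eq] at this ⊢
      rcases Int.emod_two_eq_zero_or_one (lk d.items x) with h0 | h1
      · omega
      · simp [h1] at this
    simp only [uniStep, hcon, Bool.false_eq_true, if_false]
    rw [oddKeys_filter_of_not_mem d.items x hx, oddKeys_cons, hparity]
    simp [oddKeys]

-- fold the simulation over the whole input
theorem fold_sim (t : List Int) (d : PySem.Dict Int Int)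
    (hnd : (d.items.map Prod.fst).Nodup) :
    t.foldl uniStep (oddKeys d.items) = oddKeys ((t.foldl uniAltStep d).items) := by
  induction t generalizing d with
  | nil => rfl
  | cons x tl ih =>
    simp only [List.foldl_cons]
    rw [step_sim d x hnd]
    exact ih (uniAltStep d x) (nodup_keys_uniAltStep d x hnd)

-- ===== VERDICT (by name: the statement is the Claim_ definition above) =====
theorem uni_spec : Claim_equal_uni := by
  intro t _
  show uni t = uni_alt t
  have h := fold_sim t PySem.Dict.empty (by simp [PySem.Dict.empty])
  simpa [uni, uni_alt, oddKeys, PySem.Dict.empty] using h
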